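-- pv_equiv track=rewrite | github.com/WiktorLidwin/EC551-PA2 | Program2/main.py | convert_sop_equation
-- ===== SOURCE A (Python) =====
-- def convert_sop_equation(sop_equation):
--     variables = set()
--     binary_string = ''
--
--     for term in sop_equation:
--         for literal in term:
--             if(literal[-1] == "'"):
--                 variables.add(literal[:-1])
--             else:
--                 variables.add(literal)
--
--     sorted_variables = sorted(variables)
--     num_rows = 2 ** len(sorted_variables)
--
--     for i in range(num_rows):
--         case = format(i, f'0{len(sorted_variables)}b')
--
--         found_match = False
--         for term in sop_equation:
--             term_match = True
--             for literal in term: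
--                 variable = literal[:-1]
--                 if(literal[-1] == "'"):
--                     variable = literal[:-1]
--                 else:
--                     variable = literal
--                 inverse = literal[-1] == "'"
--
--                 if (inverse and case[sorted_variables.index(variable)] == '0') or \
--                    (not inverse and case[sorted_variables.index(variable)] == '1'):
--                     term_match = False
--                     break
--
--             if term_match:
--                 found_match = True
--                 break
--
--         binary_string += '1' if found_match else '0'
--     return (tuple(sorted_variables), binary_string)
-- ===== SOURCE B (Python) =====
-- def convert_sop_equation(sop_equation):
--     variables = set()
--     for term in sop_equation:
--         for literal in term:
--             variables.add(literal[:-1] if literal[-1] == "'" else literal)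
--     sorted_variables = sorted(variables)
--     n = len(sorted_variables)
--     # Compile each term once into a pair of bit masks over the row index
--     # (bit n-1-idx of the row corresponds to the variable at sorted index idx):
--     # primed literals require their bit set, plain literals require it clear.
--     masks = []
--     for term in sop_equation:
--         ones = 0
--         zeros = 0
--         for literal in term:
--             if literal[-1] == "'":
--                 ones |= 1 << (n - 1 - sorted_variables.index(literal[:-1]))
--             else:
--                 zeros |= 1 << (n - 1 - sorted_variables.index(literal))
--         masks.append((ones, zeros))
--     bits = []
--     for i in range(2 ** n):
--         hit = any((i & ones) == ones and (i & zeros) == 0 for ones, zeros in masks)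
--         bits.append('1' if hit else '0')
--     return (tuple(sorted_variables), ''.join(bits))
-- ===== Notes on version B (the rewrite author's own statement) =====
-- stated objective: alternative
-- what changed: Instead of re-evaluating every literal for each of the 2^n rows (building a binary string per row and rescanning sorted_variables with .index per literal per row), B compiles each term once into a (ones, zeros) bit-mask pair over the row index and tests each row with two AND comparisons.
import Mathlib
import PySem

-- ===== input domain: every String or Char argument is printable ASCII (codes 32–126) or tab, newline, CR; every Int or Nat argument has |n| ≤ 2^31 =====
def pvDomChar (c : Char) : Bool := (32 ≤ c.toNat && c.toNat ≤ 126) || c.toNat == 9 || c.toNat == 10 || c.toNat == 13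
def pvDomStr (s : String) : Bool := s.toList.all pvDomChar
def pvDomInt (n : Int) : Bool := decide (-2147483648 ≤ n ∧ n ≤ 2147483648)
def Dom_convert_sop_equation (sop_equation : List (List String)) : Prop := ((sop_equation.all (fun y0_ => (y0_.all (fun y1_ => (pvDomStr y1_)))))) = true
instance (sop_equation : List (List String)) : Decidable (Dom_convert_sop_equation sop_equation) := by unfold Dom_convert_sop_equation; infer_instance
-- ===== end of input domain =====

-- B replaces A's per-row re-evaluation of every literal (with its string-built truth
-- assignment and repeated list.index scans) by compiling each term once into a pair of
-- bit masks over the row index and testing each row with two AND comparisons.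

-- ===== PORT A =====
-- Both Pythons open with the identical variable-collection loop; shared helper.
def pvVars (sop : List (List String)) : PySem.Set String :=
  sop.foldl (fun s term =>
    term.foldl (fun s literal =>
      if PySem.Str.pyGet? literal (-1) == some '\'' then
        PySem.Set.add s (PySem.Str.slice literal none (some (-1)))
      else
        PySem.Set.add s literal) s) PySem.Set.empty

-- exact hand port of Python's format(i, f'0{w}b') for i ≥ 0: binary digits of m,
-- most-significant first, zero-padded on the left to width w (and '0' for m = 0).
def pyFormatBin (m w : Nat) : List Char :=
  let len := max w (max 1 m.size)
  (List.range len).map (fun k => if m.testBit (len - 1 - k) then '1' else '0')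

def pvTermMatch (sv : List String) (cas : List Char) : List String → Bool
  | [] => true
  | literal :: rest =>
    let inverse := PySem.Str.pyGet? literal (-1) == some '\''
    let v := if inverse then PySem.Str.slice literal none (some (-1)) else literal
    -- case[sorted_variables.index(variable)]; index? = none is Python's ValueError (outside Pre_)
    let c : Option Char :=
      match PySem.List.index? sv v with
      | none => none
      | some j => PySem.List.pyGet? cas (j : Int)
    if (inverse && (c == some '0')) || (!inverse && (c == some '1')) then false
    else pvTermMatch sv cas rest

def pvFindMatch (sv : List String) (cas : List Char) : List (List String) → Bool
  | [] => false
  | term :: rest => if pvTermMatch sv cas term then true else pvFindMatch sv cas rest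

def convert_sop_equation (sop_equation : List (List String)) : List String × String :=
  let vars := pvVars sop_equation
  let sorted_variables := PySem.List.sorted vars (fun x => x) false
  let num_rows : Int := 2 ^ sorted_variables.length
  let binary_string : List Char :=
    (PySem.List.pyRange 0 num_rows 1).foldl
      (fun acc i =>
        let cas := pyFormatBin i.toNat sorted_variables.length  -- i ≥ 0 inside range(num_rows)
        acc ++ [if pvFindMatch sorted_variables cas sop_equation then '1' else '0']) []
  (sorted_variables, String.ofList binary_string)

-- ===== PORT B =====
-- one (ones, zeros) mask pair per term; .index = none is Python's ValueError (outside Pre_)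
def pvMaskOf (sv : List String) (term : List String) : Nat × Nat :=
  term.foldl (fun oz literal =>
    if PySem.Str.pyGet? literal (-1) == some '\'' then
      (oz.1 ||| (1 <<< (sv.length - 1 -
        ((PySem.List.index? sv (PySem.Str.slice literal none (some (-1)))).getD 0))), oz.2)
    else
      (oz.1, oz.2 ||| (1 <<< (sv.length - 1 - ((PySem.List.index? sv literal).getD 0))))) (0, 0)

def convert_sop_equation_alt (sop_equation : List (List String)) : List String × String :=
  let sorted_variables := PySem.List.sorted (pvVars sop_equation) (fun x => x) false
  let n := sorted_variables.length
  let masks : List (Nat × Nat) :=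
    sop_equation.foldl (fun acc term => acc ++ [pvMaskOf sorted_variables term]) []
  let bits : List Char :=
    (List.range (2 ^ n)).map (fun i =>  -- range(2 ** n): nonnegative, ported over Nat
      if masks.any (fun m => (i &&& m.1 == m.1) && (i &&& m.2 == 0)) then '1' else '0')
  (sorted_variables, String.ofList bits)

-- ===== PRECONDITION & SPEC =====
-- Pre_ excludes terms containing the empty literal "", on which A raises IndexError at literal[-1].
def Pre_convert_sop_equation (sop_equation : List (List String)) : Prop :=
  ∀ term ∈ sop_equation, ∀ literal ∈ term, literal ≠ ""
instance (sop_equation : List (List String)) : Decidable (Pre_convert_sop_equation sop_equation) := by unfold Pre_convert_sop_equation; infer_instance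

def pvWitness_convert_sop_equation : List (List String) := [["a", "b'"], ["b"], []]

def Spec_convert_sop_equation (sop_equation : List (List String)) (out : List String × String) : Prop := out = convert_sop_equation_alt sop_equation
instance (sop_equation : List (List String)) (out : List String × String) : Decidable (Spec_convert_sop_equation sop_equation out) := by unfold Spec_convert_sop_equation; infer_instance

-- ===== CLAIM (what is proved, stated in full; the proofs are below) =====
def Claim_equal_convert_sop_equation : Prop := ∀ (sop_equation : List (List String)), Dom_convert_sop_equation sop_equation → Pre_convert_sop_equation sop_equation → Spec_convert_sop_equation sop_equation (convert_sop_equation sop_equation)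

-- ===== LEMMAS AND PROOFS =====

def pvVarOf (literal : String) : String :=
  if PySem.Str.pyGet? literal (-1) == some '\'' then PySem.Str.slice literal none (some (-1))
  else literal

lemma pvVars_inner_mono (l : List String) (s : PySem.Set String) (x : String) (hx : x ∈ s) :
    x ∈ l.foldl (fun s literal =>
      if PySem.Str.pyGet? literal (-1) == some '\'' then
        PySem.Set.add s (PySem.Str.slice literal none (some (-1)))
      else PySem.Set.add s literal) s := by
  induction l generalizing s with
  | nil => exact hx
  | cons a l ih =>
    simp only [List.foldl_cons]
    split <;> exact ih _ (by simp [PySem.Set.mem_add, hx])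

lemma pvVars_inner_mem (l : List String) (s : PySem.Set String) (lit : String) (h : lit ∈ l) :
    pvVarOf lit ∈ l.foldl (fun s literal =>
      if PySem.Str.pyGet? literal (-1) == some '\'' then
        PySem.Set.add s (PySem.Str.slice literal none (some (-1)))
      else PySem.Set.add s literal) s := by
  induction l generalizing s with
  | nil => cases h
  | cons a l ih =>
    rcases List.mem_cons.mp h with rfl | h
    · simp only [List.foldl_cons]
      by_cases hc : (PySem.Str.pyGet? lit (-1) == some '\'') = true
      · rw [if_pos hc]; apply pvVars_inner_mono
        unfold pvVarOf; rw [if_pos hc]; simp [PySem.Set.mem_add]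
      · rw [if_neg hc]; apply pvVars_inner_mono
        unfold pvVarOf; rw [if_neg hc]; simp [PySem.Set.mem_add]
    · simp only [List.foldl_cons]
      split <;> exact ih _ h

lemma pvVars_outer_mono (sop : List (List String)) (s : PySem.Set String) (x : String)
    (hx : x ∈ s) :
    x ∈ sop.foldl (fun s term =>
      term.foldl (fun s literal =>
        if PySem.Str.pyGet? literal (-1) == some '\'' then
          PySem.Set.add s (PySem.Str.slice literal none (some (-1)))
        else PySem.Set.add s literal) s) s := by
  induction sop generalizing s with
  | nil => exact hx
  | cons t rest ih => exact ih _ (pvVars_inner_mono _ _ _ hx)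

lemma pvVars_mem (sop : List (List String)) (term : List String) (lit : String)
    (ht : term ∈ sop) (hl : lit ∈ term) : pvVarOf lit ∈ pvVars sop := by
  unfold pvVars
  generalize PySem.Set.empty = s
  induction sop generalizing s with
  | nil => cases ht
  | cons t rest ih =>
    rcases List.mem_cons.mp ht with rfl | ht
    · simp only [List.foldl_cons]
      exact pvVars_outer_mono rest _ _ (pvVars_inner_mem _ s _ hl)
    · exact ih ht _

lemma pvFindMatch_eq_any (sv : List String) (cas : List Char) (ts : List (List String)) :
    pvFindMatch sv cas ts = ts.any (pvTermMatch sv cas) := by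
  induction ts with
  | nil => rfl
  | cons t rest ih => by_cases h : pvTermMatch sv cas t = true <;> simp [pvFindMatch, h, ih]

lemma pv_and_or_eq (k o p : Nat) : (k &&& (o ||| p) = (o ||| p)) ↔ (k &&& o = o ∧ k &&& p = p) := by
  constructor
  · intro h
    refine ⟨Nat.eq_of_testBit_eq fun i => ?_, Nat.eq_of_testBit_eq fun i => ?_⟩ <;>
    · have h' := congrArg (fun x => Nat.testBit x i) h
      simp only [Nat.testBit_and, Nat.testBit_or] at h' ⊢
      revert h'; cases k.testBit i <;> cases o.testBit i <;> cases p.testBit i <;> simp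
  · rintro ⟨h1, h2⟩
    apply Nat.eq_of_testBit_eq; intro i
    have h1' := congrArg (fun x => Nat.testBit x i) h1
    have h2' := congrArg (fun x => Nat.testBit x i) h2
    simp only [Nat.testBit_and, Nat.testBit_or] at h1' h2' ⊢
    revert h1' h2'; cases k.testBit i <;> cases o.testBit i <;> cases p.testBit i <;> simp

lemma pv_and_or_zero (k o p : Nat) : (k &&& (o ||| p) = 0) ↔ (k &&& o = 0 ∧ k &&& p = 0) := by
  constructor
  · intro h
    refine ⟨Nat.eq_of_testBit_eq fun i => ?_, Nat.eq_of_testBit_eq fun i => ?_⟩ <;>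
    · have h' := congrArg (fun x => Nat.testBit x i) h
      simp only [Nat.testBit_and, Nat.testBit_or, Nat.zero_testBit] at h' ⊢
      revert h'; cases k.testBit i <;> cases o.testBit i <;> cases p.testBit i <;> simp
  · rintro ⟨h1, h2⟩
    apply Nat.eq_of_testBit_eq; intro i
    have h1' := congrArg (fun x => Nat.testBit x i) h1
    have h2' := congrArg (fun x => Nat.testBit x i) h2
    simp only [Nat.testBit_and, Nat.testBit_or, Nat.zero_testBit] at h1' h2' ⊢
    revert h1' h2'; cases k.testBit i <;> cases o.testBit i <;> cases p.testBit i <;> simp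

lemma pv_and_pow_eq (k p : Nat) : (k &&& 2 ^ p = 2 ^ p) ↔ k.testBit p = true := by
  constructor
  · intro h
    have h' := congrArg (fun x => Nat.testBit x p) h
    simpa [Nat.testBit_and, Nat.testBit_two_pow_self] using h'
  · intro h
    apply Nat.eq_of_testBit_eq; intro i
    by_cases hip : i = p
    · subst hip; simp [Nat.testBit_and, h, Nat.testBit_two_pow_self]
    · simp [Nat.testBit_and, Nat.testBit_two_pow, Ne.symm hip]

lemma pv_and_pow_zero (k p : Nat) : (k &&& 2 ^ p = 0) ↔ k.testBit p = false := by
  constructor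
  · intro h
    have h' := congrArg (fun x => Nat.testBit x p) h
    simpa [Nat.testBit_and, Nat.testBit_two_pow_self, Nat.zero_testBit] using h'
  · intro h
    apply Nat.eq_of_testBit_eq; intro i
    by_cases hip : i = p
    · subst hip; simp [Nat.testBit_and, h, Nat.zero_testBit]
    · simp [Nat.testBit_and, Nat.testBit_two_pow, Ne.symm hip, Nat.zero_testBit]

lemma pyFormatBin_get (m n j : Nat) (hn : 0 < n) (hm : m < 2 ^ n) (hj : j < n) :
    (pyFormatBin m n)[j]? = some (if m.testBit (n - 1 - j) then '1' else '0') := by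
  have hs : m.size ≤ n := Nat.size_le.mpr hm
  unfold pyFormatBin
  have hlen : max n (max 1 m.size) = n := by omega
  simp [hlen, hj]

-- B's per-literal fold step (the lambda of pvMaskOf, named for the proofs)
def pvStepB (sv : List String) (oz : Nat × Nat) (literal : String) : Nat × Nat :=
  if PySem.Str.pyGet? literal (-1) == some '\'' then
    (oz.1 ||| (1 <<< (sv.length - 1 -
      ((PySem.List.index? sv (PySem.Str.slice literal none (some (-1)))).getD 0))), oz.2)
  else
    (oz.1, oz.2 ||| (1 <<< (sv.length - 1 - ((PySem.List.index? sv literal).getD 0))))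

lemma pvMaskOf_eq_foldl (sv : List String) (term : List String) :
    pvMaskOf sv term = term.foldl (pvStepB sv) (0, 0) := rfl

-- per row and term: A's literal scan over the bit string equals B's mask test
lemma pv_mask_spec (sv : List String) (k : Nat) (hk : k < 2 ^ sv.length)
    (term : List String) (hlit : ∀ lit ∈ term, pvVarOf lit ∈ sv) (o z : Nat) :
    (k &&& (term.foldl (pvStepB sv) (o, z)).1 = (term.foldl (pvStepB sv) (o, z)).1 ∧
     k &&& (term.foldl (pvStepB sv) (o, z)).2 = 0)
    ↔ ((k &&& o = o ∧ k &&& z = 0) ∧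
       pvTermMatch sv (pyFormatBin k sv.length) term = true) := by
  induction term generalizing o z with
  | nil => simp [pvTermMatch]
  | cons lit rest ih =>
    have hv : pvVarOf lit ∈ sv := hlit lit (by simp)
    have hrest : ∀ l ∈ rest, pvVarOf l ∈ sv := fun l hl => hlit l (by simp [hl])
    by_cases hb : (PySem.Str.pyGet? lit (-1) == some '\'') = true
    · -- primed literal: requires its bit SET
      have hv' : PySem.Str.slice lit none (some (-1)) ∈ sv := by
        have := hv; unfold pvVarOf at this; rwa [if_pos hb] at this
      obtain ⟨j, hj⟩ : ∃ j, PySem.List.index? sv (PySem.Str.slice lit none (some (-1))) = some j := by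
        have := (PySem.List.index?_isSome_iff sv (PySem.Str.slice lit none (some (-1)))).mpr hv'
        exact Option.isSome_iff_exists.mp this
      obtain ⟨hjlt, -, -⟩ := PySem.List.getElem_of_index?_eq_some hj
      have hn : 0 < sv.length := by omega
      have hstep : pvStepB sv (o, z) lit =
          (o ||| 2 ^ (sv.length - 1 - j), z) := by
        unfold pvStepB; rw [if_pos hb, hj]; simp [Nat.one_shiftLeft]
      have hc : pvTermMatch sv (pyFormatBin k sv.length) (lit :: rest)
          = (if k.testBit (sv.length - 1 - j) = true
             then pvTermMatch sv (pyFormatBin k sv.length) rest else false) := by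
        have hj' : List.idxOf? (PySem.Str.slice lit none (some (-1))) sv = some j := by
          rw [← PySem.List.index?_eq_idxOf?]; exact hj
        simp only [pvTermMatch, hb, hj, hj', if_true, PySem.List.pyGet?_natCast,
          pyFormatBin_get k sv.length j hn hk hjlt]
        by_cases ht : k.testBit (sv.length - 1 - j) = true <;>
          simp [ht, hj', pyFormatBin_get k sv.length j hn hk hjlt]
      rw [List.foldl_cons, hstep, ih hrest, hc]
      rw [pv_and_or_eq, pv_and_pow_eq]
      by_cases ht : k.testBit (sv.length - 1 - j) = true <;> simp [ht]
    · -- plain literal: requires its bit CLEAR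
      have hv' : lit ∈ sv := by
        have := hv; unfold pvVarOf at this; rwa [if_neg hb] at this
      obtain ⟨j, hj⟩ : ∃ j, PySem.List.index? sv lit = some j := by
        have := (PySem.List.index?_isSome_iff sv lit).mpr hv'
        exact Option.isSome_iff_exists.mp this
      obtain ⟨hjlt, -, -⟩ := PySem.List.getElem_of_index?_eq_some hj
      have hn : 0 < sv.length := by omega
      have hstep : pvStepB sv (o, z) lit =
          (o, z ||| 2 ^ (sv.length - 1 - j)) := by
        unfold pvStepB; rw [if_neg hb, hj]; simp [Nat.one_shiftLeft]
      have hc : pvTermMatch sv (pyFormatBin k sv.length) (lit :: rest)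
          = (if k.testBit (sv.length - 1 - j) = true then false
             else pvTermMatch sv (pyFormatBin k sv.length) rest) := by
        have hb' : (PySem.Str.pyGet? lit (-1) == some '\'') = false := by
          revert hb; cases PySem.Str.pyGet? lit (-1) == some '\'' <;> simp
        have hj' : List.idxOf? lit sv = some j := by
          rw [← PySem.List.index?_eq_idxOf?]; exact hj
        simp only [pvTermMatch, hb', hj, hj', if_false, PySem.List.pyGet?_natCast,
          pyFormatBin_get k sv.length j hn hk hjlt]
        by_cases ht : k.testBit (sv.length - 1 - j) = true <;>
          simp [ht, hj', pyFormatBin_get k sv.length j hn hk hjlt]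
      rw [List.foldl_cons, hstep, ih hrest, hc]
      rw [pv_and_or_zero, pv_and_pow_zero]
      by_cases ht : k.testBit (sv.length - 1 - j) = true <;> simp [ht]

lemma pv_rows_eq (sop : List (List String)) (sv : List String)
    (hmem : ∀ term ∈ sop, ∀ lit ∈ term, pvVarOf lit ∈ sv) :
    (PySem.List.pyRange 0 (2 ^ sv.length : Int) 1).foldl
      (fun acc i =>
        acc ++ [if pvFindMatch sv (pyFormatBin i.toNat sv.length) sop then '1' else '0']) []
    = (List.range (2 ^ sv.length)).map (fun i =>
        if (sop.foldl (fun acc term => acc ++ [pvMaskOf sv term]) []).any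
             (fun m => (i &&& m.1 == m.1) && (i &&& m.2 == 0)) then '1' else '0') := by
  rw [PySem.List.foldl_append_singleton_eq_map, PySem.List.foldl_append_singleton_eq_map,
    PySem.List.pyRange_one]
  have h2n : ((2 ^ sv.length : Int) - 0).toNat = 2 ^ sv.length := by
    have h : ((2 : Int) ^ sv.length) = ((2 ^ sv.length : Nat) : Int) := by push_cast; ring
    rw [Int.sub_zero, h, Int.toNat_natCast]
  rw [h2n]
  simp only [List.nil_append, List.map_map]
  apply List.map_congr_left
  intro q hq
  have hq' : q < 2 ^ sv.length := List.mem_range.mp hq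
  simp only [Function.comp_apply]
  have htn : ((0 : Int) + (q : Int)).toNat = q := by simp
  simp only [htn, pvFindMatch_eq_any, List.any_map, Function.comp_def]
  have hb : sop.any (pvTermMatch sv (pyFormatBin q sv.length))
      = sop.any (fun t => ((q &&& (pvMaskOf sv t).1 == (pvMaskOf sv t).1)
          && (q &&& (pvMaskOf sv t).2 == 0))) := by
    apply PySem.List.any_congr_mem
    intro t ht
    have hm := pv_mask_spec sv q hq' t (fun l hl => hmem t ht l hl) 0 0
    rw [← pvMaskOf_eq_foldl] at hm
    simp only [Nat.and_zero, and_self, true_and] at hm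
    rw [Bool.eq_iff_iff]
    simp only [Bool.and_eq_true, beq_iff_eq]
    exact hm.symm
  exact if_congr (by rw [hb]) rfl rfl

-- ===== VERDICT (by name: the statement is the Claim_ definition above) =====
theorem convert_sop_equation_spec : Claim_equal_convert_sop_equation := by
  intro sop _ _
  unfold Spec_convert_sop_equation convert_sop_equation convert_sop_equation_alt
  refine congrArg₂ Prod.mk rfl (congrArg String.ofList ?_)
  apply pv_rows_eq
  intro t ht l hl
  exact (PySem.List.mem_sorted _ _ _ _).mpr (pvVars_mem sop t l ht hl)
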